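-- pv_equiv track=rewrite | github.com/mellinkarl/AgenticHelloWorld | backend/amie/agents/ia.py | _ext_from_ct_or_name
-- ===== SOURCE A (Python) =====
-- from typing import Dict, Any, Tuple, Optional, List
--
-- def _ext_from_ct_or_name(ct: Optional[str], name: Optional[str]) -> str:
--     ct = (ct or "").lower()
--     name_l = (name or "").lower()
--
--     if name_l.endswith(".pdf") or ct == "application/pdf":
--         return ".pdf"
--     # common image types (accepted upstream)
--     for suf in (".png", ".jpg", ".jpeg", ".webp", ".gif", ".bmp", ".tiff", ".tif"):
--         if name_l.endswith(suf):
--             return suf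
--     if ct.startswith("image/"):
--         # fallback to generic when content-type says image but name is unknown
--         return ".img"
--     # last resort
--     return ".bin"
-- ===== SOURCE B (Python) =====
-- _EXT_TABLE = {".pdf", ".png", ".jpg", ".jpeg", ".webp", ".gif", ".bmp", ".tiff", ".tif"}
--
--
-- def _trailing_ext(s):
--     """One reverse character walk: the chars after the last '.' (None if no dot)."""
--     buf = []
--     for ch in reversed(s):
--         if ch == ".":
--             return "." + "".join(reversed(buf))
--         buf.append(ch)
--     return None
--
--
-- def _ext_from_ct_or_name(ct, name):
--     ct = (ct or "").lower()
--     ext = _trailing_ext((name or "").lower())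
--     known = ext if ext in _EXT_TABLE else None
--     if known == ".pdf" or ct == "application/pdf":
--         return ".pdf"
--     if known is not None:
--         return known
--     return ".img" if ct.startswith("image/") else ".bin"
-- ===== Notes on version B (the rewrite author's own statement) =====
-- stated objective: alternative
-- what changed: B never runs A's endswith loop: one reverse character walk extracts the trailing extension, and a single nine-entry lookup table that includes '.pdf' decides (the PDF case is folded into the same table lookup instead of its own suffix test).
import Mathlib
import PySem

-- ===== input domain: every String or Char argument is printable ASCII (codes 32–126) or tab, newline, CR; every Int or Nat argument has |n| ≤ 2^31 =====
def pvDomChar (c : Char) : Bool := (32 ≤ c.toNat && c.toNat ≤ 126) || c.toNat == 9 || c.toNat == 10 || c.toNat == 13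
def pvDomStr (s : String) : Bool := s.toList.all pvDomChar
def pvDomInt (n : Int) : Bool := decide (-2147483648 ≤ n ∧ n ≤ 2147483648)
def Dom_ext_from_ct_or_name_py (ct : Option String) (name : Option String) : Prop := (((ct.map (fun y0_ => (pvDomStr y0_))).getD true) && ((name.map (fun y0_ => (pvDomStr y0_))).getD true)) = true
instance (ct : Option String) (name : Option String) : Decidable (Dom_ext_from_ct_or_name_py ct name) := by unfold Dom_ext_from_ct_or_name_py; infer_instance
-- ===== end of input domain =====

-- B never tests suffixes: one reverse character walk extracts the trailing extension and a
-- single nine-entry lookup table (PDF included) decides — same result, alternative structure.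

-- ===== PORT A =====
-- the suffix tuple of A's for-loop
def pvImgSufs : List String := [".png", ".jpg", ".jpeg", ".webp", ".gif", ".bmp", ".tiff", ".tif"]

def ext_from_ct_or_name_py (ct : Option String) (name : Option String) : String :=
  let ctl := PySem.Str.lower (ct.getD "")
  let nameL := PySem.Str.lower (name.getD "")
  if PySem.Str.endswith nameL ".pdf" || ctl == "application/pdf" then ".pdf"
  else
    -- the for-loop with early return: first suffix that matches
    match pvImgSufs.find? (fun suf => PySem.Str.endswith nameL suf) with
    | some suf => suf
    | none => if PySem.Str.startswith ctl "image/" then ".img" else ".bin"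

-- ===== PORT B =====
-- B's _EXT_TABLE (the nine known extensions, PDF included)
def pvExtTable : List String := [".pdf", ".png", ".jpg", ".jpeg", ".webp", ".gif", ".bmp", ".tiff", ".tif"]

-- B's _trailing_ext: walk the reversed characters once, accumulating buf, stop at the first '.'
def trailingExtGo : List Char → List Char → Option String
  | [], _ => none
  | c :: rest, buf =>
    if c == '.' then some (String.ofList ('.' :: buf.reverse))
    else trailingExtGo rest (buf ++ [c])

def trailingExt (s : String) : Option String := trailingExtGo s.toList.reverse []

def ext_from_ct_or_name_py_alt (ct : Option String) (name : Option String) : String :=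
  let ctl := PySem.Str.lower (ct.getD "")
  let ext := trailingExt (PySem.Str.lower (name.getD ""))
  let known : Option String :=
    match ext with
    | some e => if pvExtTable.contains e then some e else none
    | none => none
  if known == some ".pdf" || ctl == "application/pdf" then ".pdf"
  else
    match known with
    | some e => e
    | none => if PySem.Str.startswith ctl "image/" then ".img" else ".bin"

-- ===== PRECONDITION & SPEC =====
def Spec_ext_from_ct_or_name_py (ct : Option String) (name : Option String) (out : String) : Prop := out = ext_from_ct_or_name_py_alt ct name
instance (ct : Option String) (name : Option String) (out : String) : Decidable (Spec_ext_from_ct_or_name_py ct name out) := by unfold Spec_ext_from_ct_or_name_py; infer_instance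

-- ===== CLAIM (what is proved, stated in full; the proofs are below) =====
def Claim_equal_ext_from_ct_or_name_py : Prop := ∀ (ct : Option String) (name : Option String), Dom_ext_from_ct_or_name_py ct name → Spec_ext_from_ct_or_name_py ct name (ext_from_ct_or_name_py ct name)

-- ===== LEMMAS AND PROOFS =====

-- the chunk after the last dot, as B extracts it
def pvExtVal (cs : List Char) : String :=
  String.ofList ('.' :: (cs.reverse.takeWhile (fun c => c != '.')).reverse)

-- B's walk, characterised: some (extension) iff a dot occurs
theorem trailingExtGo_spec (l buf : List Char) :
    trailingExtGo l buf =
      if '.' ∈ l then some (String.ofList ('.' :: (buf ++ l.takeWhile (fun c => c != '.')).reverse))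
      else none := by
  induction l generalizing buf with
  | nil => simp [trailingExtGo]
  | cons c rest ih =>
    by_cases hc : c = '.'
    · subst hc; simp [trailingExtGo]
    · have : (c == '.') = false := beq_eq_false_iff_ne.mpr hc
      simp only [trailingExtGo, this, Bool.false_eq_true, if_false, ih,
        List.takeWhile_cons, bne_iff_ne, ne_eq, hc, not_false_eq_true,
        List.mem_cons]
      have hb : (buf ++ [c]) ++ rest.takeWhile (fun c => c != '.') =
          buf ++ (c :: rest.takeWhile (fun c => c != '.')) := by simp
      simp [hb, Ne.symm hc]

theorem trailingExt_spec (s : String) :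
    trailingExt s = if '.' ∈ s.toList then some (pvExtVal s.toList) else none := by
  rw [trailingExt, trailingExtGo_spec]
  simp [pvExtVal]

-- find? with two pointwise-equal predicates agrees
theorem find?_congr' {α : Type} (p q : α → Bool) (l : List α) (h : ∀ x ∈ l, p x = q x) :
    l.find? p = l.find? q := by
  induction l with
  | nil => rfl
  | cons a t ih =>
    simp only [List.find?, h a (by simp)]
    cases q a with
    | true => rfl
    | false => exact ih fun x hx => h x (by simp [hx])

-- find? for equality with a fixed element is a contains-test
theorem find?_beq (l : List String) (e : String) :
    l.find? (fun x => x == e) = if l.contains e then some e else none := by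
  induction l with
  | nil => rfl
  | cons a t ih =>
    by_cases h : a = e
    · simp [List.find?, h]
    · simp only [List.find?, beq_eq_false_iff_ne.mpr h, List.contains_cons, ih]
      simp [Ne.symm h]

-- the ".xyz"-suffix test is exactly "the chunk after the last dot is xyz"
theorem suffix_dot_iff (cs q : List Char) (hq : ∀ c ∈ q, c ≠ '.') (hdot : '.' ∈ cs) :
    ('.' :: q) <:+ cs ↔ q = (cs.reverse.takeWhile (fun c => c != '.')).reverse := by
  constructor
  · rintro ⟨r, hr⟩
    have hrev : cs.reverse = q.reverse ++ '.' :: r.reverse := by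
      rw [← hr]; simp
    rw [hrev, List.takeWhile_append]
    have hall : List.takeWhile (fun c => c != '.') q.reverse = q.reverse := by
      rw [List.takeWhile_eq_self_iff]
      intro c hc
      simpa using hq c (by simpa using hc)
    simp [hall]
  · intro hqe
    have hne : cs.reverse.dropWhile (fun c => c != '.') ≠ [] := by
      intro hnil
      rw [List.dropWhile_eq_nil_iff] at hnil
      have := hnil '.' (by simpa using hdot)
      simp at this
    have hh : (cs.reverse.dropWhile (fun c => c != '.')).head hne = '.' := by
      have := List.head_dropWhile_not (fun c => c != '.') hne
      simpa using this
    have hd : cs.reverse.dropWhile (fun c => c != '.') =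
        '.' :: (cs.reverse.dropWhile (fun c => c != '.')).tail := by
      conv_lhs => rw [← List.cons_head_tail hne]
      rw [hh]
    refine ⟨(cs.reverse.dropWhile (fun c => c != '.')).tail.reverse, ?_⟩
    have hsplit : cs.reverse = q.reverse ++ '.' :: (cs.reverse.dropWhile (fun c => c != '.')).tail := by
      conv_lhs => rw [← List.takeWhile_append_dropWhile (p := fun c => c != '.') (l := cs.reverse)]
      rw [← hd, hqe]
      simp
    conv_rhs => rw [← List.reverse_reverse cs, hsplit]
    simp

-- every entry of the nine-extension table is a dot followed by dot-free chars
theorem table_shape (suf : String) (hsuf : suf ∈ pvExtTable) :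
    ∃ qs : List Char, suf.toList = '.' :: qs ∧ ∀ c ∈ qs, c ≠ '.' := by
  simp only [pvExtTable, List.mem_cons, List.not_mem_nil, or_false] at hsuf
  rcases hsuf with h1|h1|h1|h1|h1|h1|h1|h1|h1 <;> subst h1
  · exact ⟨['p','d','f'], by simp, by simp⟩
  · exact ⟨['p','n','g'], by simp, by simp⟩
  · exact ⟨['j','p','g'], by simp, by simp⟩
  · exact ⟨['j','p','e','g'], by simp, by simp⟩
  · exact ⟨['w','e','b','p'], by simp, by simp⟩
  · exact ⟨['g','i','f'], by simp, by simp⟩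
  · exact ⟨['b','m','p'], by simp, by simp⟩
  · exact ⟨['t','i','f','f'], by simp, by simp⟩
  · exact ⟨['t','i','f'], by simp, by simp⟩

-- under a dot: the endswith test against any table entry is an equality with B's extraction
theorem endswith_eq_beq (nameL suf : String) (hsuf : suf ∈ pvExtTable)
    (hdot : '.' ∈ nameL.toList) :
    PySem.Str.endswith nameL suf = (suf == pvExtVal nameL.toList) := by
  rcases table_shape suf hsuf with ⟨qs, hqs, hqsfree⟩
  rw [Bool.eq_iff_iff, beq_iff_eq]
  rw [show PySem.Str.endswith nameL suf = PySem.Chars.endswith nameL.toList suf.toList from by simp,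
      PySem.Chars.endswith_iff, hqs, suffix_dot_iff nameL.toList qs hqsfree hdot]
  constructor
  · intro hq2
    apply String.toList_inj.mp
    rw [hqs, hq2, pvExtVal, String.toList_ofList]
  · intro hse
    have : suf.toList = '.' :: (nameL.toList.reverse.takeWhile (fun c => c != '.')).reverse := by
      rw [hse, pvExtVal, String.toList_ofList]
    rw [hqs] at this
    exact (List.cons.inj this).2

-- no dot in the name: no table entry is a suffix
theorem no_dot_endswith_false (nameL suf : String) (hsuf : suf ∈ pvExtTable)
    (h : '.' ∉ nameL.toList) : PySem.Str.endswith nameL suf = false := by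
  cases hb : PySem.Str.endswith nameL suf with
  | false => rfl
  | true =>
    have hsuffix : suf.toList <:+ nameL.toList :=
      (PySem.Chars.endswith_iff nameL.toList suf.toList).1 (by simpa using hb)
    rcases table_shape suf hsuf with ⟨qs, hqs, _⟩
    exact absurd (hsuffix.subset (by rw [hqs]; simp)) h

theorem pdf_mem_table : (".pdf" : String) ∈ pvExtTable := by decide

theorem pdf_contains_table : pvExtTable.contains (".pdf" : String) = true := by decide

theorem imgsufs_mem_table : ∀ s ∈ pvImgSufs, s ∈ pvExtTable := by decide

set_option maxRecDepth 8192 in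
theorem ports_agree (ct name : Option String) :
    ext_from_ct_or_name_py ct name = ext_from_ct_or_name_py_alt ct name := by
  unfold ext_from_ct_or_name_py ext_from_ct_or_name_py_alt
  dsimp only
  rw [trailingExt_spec]
  set ctl := PySem.Str.lower (ct.getD "") with hctl
  set nameL := PySem.Str.lower (name.getD "") with hname
  by_cases hdot : '.' ∈ nameL.toList
  · rw [if_pos hdot]
    dsimp only
    set e := pvExtVal nameL.toList with he
    have hpdf : PySem.Str.endswith nameL ".pdf" = (e == ".pdf") := by
      rw [endswith_eq_beq nameL ".pdf" pdf_mem_table hdot]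
      exact Bool.eq_iff_iff.mpr ⟨fun h => beq_iff_eq.mpr (beq_iff_eq.mp h).symm,
        fun h => beq_iff_eq.mpr (beq_iff_eq.mp h).symm⟩
    have hkB : ((if pvExtTable.contains e = true then some e else none) == some (".pdf" : String))
        = (e == ".pdf") := by
      by_cases h : pvExtTable.contains e = true
      · rw [if_pos h]; simp
      · rw [if_neg h]
        have hne : (e == (".pdf" : String)) = false := by
          refine beq_eq_false_iff_ne.mpr fun hee => h ?_
          rw [hee]; exact pdf_contains_table
        rw [hne]; rfl
    rw [hpdf, hkB]
    by_cases hC : ((e == ".pdf") || ctl == "application/pdf") = true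
    · simp only [if_pos hC]
    · simp only [if_neg hC]
      have hepdf : e ≠ ".pdf" := fun hee => hC (by rw [beq_iff_eq.mpr hee, Bool.true_or])
      have hcE : pvExtTable.contains e = pvImgSufs.contains e := by
        rw [show pvExtTable = ".pdf" :: pvImgSufs from rfl, List.contains_cons,
          beq_eq_false_iff_ne.mpr hepdf, Bool.false_or]
      have hfind : pvImgSufs.find? (fun suf => PySem.Str.endswith nameL suf)
          = if pvImgSufs.contains e then some e else none := by
        rw [find?_congr' _ (fun suf => suf == e) _
          (fun suf hs => endswith_eq_beq nameL suf (imgsufs_mem_table suf hs) hdot),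
          find?_beq]
      rw [hfind, hcE]
  · rw [if_neg hdot]
    dsimp only
    have hpdf : PySem.Str.endswith nameL ".pdf" = false :=
      no_dot_endswith_false nameL ".pdf" pdf_mem_table hdot
    have hfind : pvImgSufs.find? (fun suf => PySem.Str.endswith nameL suf) = none := by
      rw [List.find?_eq_none]
      intro suf hs
      simpa using no_dot_endswith_false nameL suf (imgsufs_mem_table suf hs) hdot
    rw [hpdf, hfind]
    rfl

-- ===== VERDICT (by name: the statement is the Claim_ definition above) =====
theorem ext_from_ct_or_name_py_spec : Claim_equal_ext_from_ct_or_name_py := by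
  intro ct name _
  exact ports_agree ct name
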